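-- pv_equiv track=rewrite | github.com/a-gavriel/Intro-Taller | Intro-Taller-Ejercicios/Jeff 2018/jeff.py | split_aux
-- ===== SOURCE A (Python) =====
-- def split_aux(num ,exp, subn, res):
--     if num == 0:
--         if subn == 0:
--             return res
--         else:
--             return split_aux(num, 0, 0, [subn] + res)
--     elif num % 10 ==0:
--         if subn == 0:
--             return split_aux(num // 10, 0, 0, res)
--         else:
--             return split_aux(num // 10, 0, 0, [subn] + res)
--     else:
--         return split_aux(num // 10, exp + 1, subn + (num % 10) * 10 ** exp, res)
-- ===== SOURCE B (Python) =====
-- def split_aux(num, exp, subn, res):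
--     while num != 0:
--         d = num % 10
--         if d == 0:
--             if subn != 0:
--                 res = [subn] + res
--             subn = 0
--             exp = 0
--         else:
--             subn += d * 10 ** exp
--             exp += 1
--         num //= 10
--     return res if subn == 0 else [subn] + res
-- ===== Notes on version B (the rewrite author's own statement) =====
-- stated objective: simpler
-- what changed: Replaces the accumulator-passing tail recursion (including the extra collapsed recursive call in the num==0, subn!=0 case) by a single explicit while-loop over the four state variables with one final return.
-- outside the precondition, e.g. on split_aux(3, -1, 0, []): A returns [0.30000000000000004], B returns [0.30000000000000004]
import Mathlib
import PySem

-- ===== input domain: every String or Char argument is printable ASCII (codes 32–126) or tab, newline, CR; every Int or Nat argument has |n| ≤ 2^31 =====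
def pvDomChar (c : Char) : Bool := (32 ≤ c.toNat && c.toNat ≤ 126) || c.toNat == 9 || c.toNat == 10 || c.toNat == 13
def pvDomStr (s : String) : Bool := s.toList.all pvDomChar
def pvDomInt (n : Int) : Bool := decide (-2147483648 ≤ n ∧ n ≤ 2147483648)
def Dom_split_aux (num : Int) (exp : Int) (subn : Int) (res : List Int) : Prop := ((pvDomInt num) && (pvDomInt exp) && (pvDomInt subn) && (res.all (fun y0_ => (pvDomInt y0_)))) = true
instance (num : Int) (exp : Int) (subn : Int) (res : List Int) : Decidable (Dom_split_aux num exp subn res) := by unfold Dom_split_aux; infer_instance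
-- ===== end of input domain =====

-- B replaces A's accumulator-passing tail recursion by an explicit while-style loop
-- over the same four state variables (objective: simpler decomposition, same cost).


-- ===== PORT A =====
-- Termination bounds for A's recursion (cited by name in decreasing_by).
theorem pv_lt_A0 (num subn : Int) (h : ¬ subn = 0) :
    num.toNat * 2 + (if (0:Int) = 0 then 0 else 1) < num.toNat * 2 + (if subn = 0 then 0 else 1) := by
  rw [if_pos rfl, if_neg h]
  exact Nat.add_lt_add_left (Nat.lt_succ_self 0) _

theorem pv_lt_A (num subn : Int) (k : Nat) (hk : k ≤ 1) (h2 : ¬ num = 0) (h3 : ¬ num < 0) :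
    (PySem.Int.floordiv num 10).toNat * 2 + k
      < num.toNat * 2 + (if subn = 0 then 0 else 1) := by
  have h0 : (0:Int) < num := lt_of_le_of_ne (le_of_not_gt h3) (Ne.symm h2)
  have e : num = ((num.toNat : Nat) : Int) := (Int.toNat_of_nonneg h0.le).symm
  have h1 : (PySem.Int.floordiv num 10).toNat < num.toNat := by
    rw [e, show (10:Int) = ((10:Nat):Int) from rfl, PySem.Int.floordiv_natCast,
      Int.toNat_natCast, Int.toNat_natCast]
    exact Nat.div_lt_self (Int.natCast_pos.mp (e ▸ h0)) (by decide)
  calc (PySem.Int.floordiv num 10).toNat * 2 + k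
      ≤ (PySem.Int.floordiv num 10).toNat * 2 + 1 := Nat.add_le_add_left hk _
    _ < ((PySem.Int.floordiv num 10).toNat + 1) * 2 := by
        rw [Nat.succ_mul]; exact Nat.add_lt_add_left (Nat.lt_succ_self 0) _
    _ ≤ num.toNat * 2 := Nat.mul_le_mul_right 2 h1
    _ ≤ num.toNat * 2 + (if subn = 0 then 0 else 1) := Nat.le_add_right _ _

theorem pv_ite_le (c : Prop) [Decidable c] : (if c then (0:Nat) else 1) ≤ 1 := by
  split
  · exact Nat.zero_le 1
  · exact Nat.le_refl 1

-- Literal port of A's recursion. '10 ** exp' is ported as 10 ^ exp.toNat: exact when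
-- 0 ≤ exp, and inside Pre_ the branch using it is only ever reached with 0 ≤ exp
-- (for negative exp Python produces floats there; Pre_ excludes those inputs).
-- 'if num < 0 then res' is a totality guard only: Python diverges for negative num,
-- which Pre_ excludes.
def split_aux (num : Int) (exp : Int) (subn : Int) (res : List Int) : List Int :=
  if num = 0 then
    if subn = 0 then res
    else split_aux num 0 0 (subn :: res)
  else if num < 0 then res
  else if PySem.Int.mod num 10 = 0 then
    if subn = 0 then split_aux (PySem.Int.floordiv num 10) 0 0 res
    else split_aux (PySem.Int.floordiv num 10) 0 0 (subn :: res)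
  else split_aux (PySem.Int.floordiv num 10) (exp + 1) (subn + PySem.Int.mod num 10 * 10 ^ exp.toNat) res
  termination_by num.toNat * 2 + (if subn = 0 then 0 else 1)
  decreasing_by
  · exact pv_lt_A0 num subn ‹_›
  all_goals exact pv_lt_A num subn _ (pv_ite_le _) ‹_› ‹_›

-- ===== PORT B =====
-- Termination bound for B's loop (cited by name in decreasing_by).
theorem pv_lt_B (num : Int) (h : ¬ num ≤ 0) :
    (PySem.Int.floordiv num 10).toNat < num.toNat := by
  have h0 : (0:Int) < num := lt_of_not_ge h
  have e : num = ((num.toNat : Nat) : Int) := (Int.toNat_of_nonneg h0.le).symm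
  rw [e, show (10:Int) = ((10:Nat):Int) from rfl, PySem.Int.floordiv_natCast,
    Int.toNat_natCast, Int.toNat_natCast]
  exact Nat.div_lt_self (Int.natCast_pos.mp (e ▸ h0)) (by decide)

-- B's 'while num != 0' loop over the state (num, exp, subn, res); the loop exit
-- also fires for negative num, where Python diverges (totality guard, outside
-- Pre_). '10 ** exp' ported as in A's port.
def split_aux_alt_loop (num : Int) (exp : Int) (subn : Int) (res : List Int) : List Int :=
  if num ≤ 0 then
    if subn = 0 then res else subn :: res
  else
    let d := PySem.Int.mod num 10
    if d = 0 then
      split_aux_alt_loop (PySem.Int.floordiv num 10) 0 0 (if subn = 0 then res else subn :: res)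
    else
      split_aux_alt_loop (PySem.Int.floordiv num 10) (exp + 1) (subn + d * 10 ^ exp.toNat) res
  termination_by num.toNat
  decreasing_by
  all_goals exact pv_lt_B num ‹_›

def split_aux_alt (num : Int) (exp : Int) (subn : Int) (res : List Int) : List Int :=
  split_aux_alt_loop num exp subn res

-- ===== PRECONDITION & SPEC =====
-- Pre_ excludes (a) negative num, where both Pythons loop forever, and (b) inputs
-- where the first decimal digit of num is nonzero while exp is negative, where
-- '10 ** exp' makes both Pythons return a list containing floats instead of ints
-- (not a value of the declared type List Int).
def Pre_split_aux (num : Int) (exp : Int) (subn : Int) (res : List Int) : Prop :=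
  0 ≤ num ∧ (0 ≤ exp ∨ num = 0 ∨ PySem.Int.mod num 10 = 0)
instance (num : Int) (exp : Int) (subn : Int) (res : List Int) : Decidable (Pre_split_aux num exp subn res) := by unfold Pre_split_aux; infer_instance
def pvWitness_split_aux : Int × Int × Int × List Int := (1020304, 0, 0, [])

def Spec_split_aux (num : Int) (exp : Int) (subn : Int) (res : List Int) (out : List Int) : Prop := out = split_aux_alt num exp subn res
instance (num : Int) (exp : Int) (subn : Int) (res : List Int) (out : List Int) : Decidable (Spec_split_aux num exp subn res out) := by unfold Spec_split_aux; infer_instance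

-- ===== CLAIM (what is proved, stated in full; the proofs are below) =====
def Claim_equal_split_aux : Prop := ∀ (num : Int) (exp : Int) (subn : Int) (res : List Int), Dom_split_aux num exp subn res → Pre_split_aux num exp subn res → Spec_split_aux num exp subn res (split_aux num exp subn res)

-- ===== LEMMAS AND PROOFS =====

-- A's recursion and B's loop agree for every nonnegative num (the exp side condition
-- of Pre_ is only needed for faithfulness of the '10 ** exp' port, not here).
theorem split_aux_eq_loop (num exp subn : Int) (res : List Int) (h : 0 ≤ num) :
    split_aux num exp subn res = split_aux_alt_loop num exp subn res := by
  fun_induction split_aux num exp subn res with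
  | case1 exp res =>
    rw [split_aux_alt_loop]; simp
  | case2 exp subn res hs ih =>
    rw [ih (le_refl 0)]
    conv_lhs => rw [split_aux_alt_loop]
    conv_rhs => rw [split_aux_alt_loop]
    simp [hs]
  | case3 num exp subn res h1 h2 => omega
  | case4 num exp res h1 h2 hm ih =>
    have hfd : (0:Int) ≤ PySem.Int.floordiv num 10 := by
      rw [PySem.Int.floordiv_eq_ediv_of_pos (by norm_num : (0:Int) < 10)]; omega
    rw [ih hfd]
    conv_rhs => rw [split_aux_alt_loop]
    rw [if_neg (show ¬ num ≤ 0 by omega)]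
    simp only [hm, reduceIte]
  | case5 num exp subn res h1 h2 hm hs ih =>
    have hfd : (0:Int) ≤ PySem.Int.floordiv num 10 := by
      rw [PySem.Int.floordiv_eq_ediv_of_pos (by norm_num : (0:Int) < 10)]; omega
    rw [ih hfd]
    conv_rhs => rw [split_aux_alt_loop]
    rw [if_neg (show ¬ num ≤ 0 by omega)]
    simp only [hm, hs, reduceIte]
  | case6 num exp subn res h1 h2 hm ih =>
    have hfd : (0:Int) ≤ PySem.Int.floordiv num 10 := by
      rw [PySem.Int.floordiv_eq_ediv_of_pos (by norm_num : (0:Int) < 10)]; omega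
    rw [ih hfd]
    conv_rhs => rw [split_aux_alt_loop]
    rw [if_neg (show ¬ num ≤ 0 by omega)]
    simp only [hm, reduceIte]

-- ===== VERDICT (by name: the statement is the Claim_ definition above) =====
theorem split_aux_spec : Claim_equal_split_aux := by
  intro num exp subn res _ hpre
  exact split_aux_eq_loop num exp subn res hpre.1
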